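-- pv_equiv track=rewrite | github.com/pypi-data/pypi-mirror-338 | packages/nace/nace-0.0.25.tar.gz/nace-0.0.25/nace/nace_v3.py | _get_rc_delta_for_action_list
-- ===== SOURCE A (Python) =====
-- def _get_rc_delta_for_action_list(action_list):
--     # ignores walls etc. Only use this for testing.
--     c = 0
--     r = 0
--     for action in action_list:
--         if action == 'down':
--             r += 1
--         if action == 'up':
--             r -= 1
--         if action == 'left':
--             c -= 1
--         if action == 'right':
--             c += 1
--     return r, c
-- ===== SOURCE B (Python) =====
-- def _get_rc_delta_for_action_list(action_list):
--     r = action_list.count('down') - action_list.count('up')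
--     c = action_list.count('right') - action_list.count('left')
--     return r, c
-- ===== Notes on version B (the rewrite author's own statement) =====
-- stated objective: simpler
-- what changed: Replaces the single branching accumulator loop with two independent list.count differences for the row and column components.
import Mathlib
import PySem

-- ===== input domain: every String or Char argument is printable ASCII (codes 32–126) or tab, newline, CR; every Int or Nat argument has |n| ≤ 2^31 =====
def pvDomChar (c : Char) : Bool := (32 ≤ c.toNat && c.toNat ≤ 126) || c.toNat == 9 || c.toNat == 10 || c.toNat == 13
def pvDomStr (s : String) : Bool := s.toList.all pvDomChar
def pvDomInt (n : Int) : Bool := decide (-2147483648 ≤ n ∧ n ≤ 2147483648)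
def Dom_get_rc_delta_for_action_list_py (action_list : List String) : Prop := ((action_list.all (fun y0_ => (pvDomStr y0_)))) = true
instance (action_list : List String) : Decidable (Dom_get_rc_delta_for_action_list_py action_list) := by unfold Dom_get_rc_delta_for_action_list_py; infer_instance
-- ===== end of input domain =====

-- ===== PORT A =====
-- B computes the two components as count differences instead of one branching pass (simpler decomposition).
def get_rc_delta_for_action_list_py (action_list : List String) : Int × Int :=
  let cr := action_list.foldl (fun (cr : Int × Int) action =>
    let cr := if action == "down" then (cr.1, cr.2 + 1) else cr
    let cr := if action == "up" then (cr.1, cr.2 - 1) else cr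
    let cr := if action == "left" then (cr.1 - 1, cr.2) else cr
    let cr := if action == "right" then (cr.1 + 1, cr.2) else cr
    cr) (0, 0)
  (cr.2, cr.1)

-- ===== PORT B =====
def get_rc_delta_for_action_list_py_alt (action_list : List String) : Int × Int :=
  ((PySem.List.count action_list "down" : Int) - (PySem.List.count action_list "up" : Int),
   (PySem.List.count action_list "right" : Int) - (PySem.List.count action_list "left" : Int))

-- ===== PRECONDITION & SPEC =====
def Spec_get_rc_delta_for_action_list_py (action_list : List String) (out : Int × Int) : Prop := out = get_rc_delta_for_action_list_py_alt action_list
instance (action_list : List String) (out : Int × Int) : Decidable (Spec_get_rc_delta_for_action_list_py action_list out) := by unfold Spec_get_rc_delta_for_action_list_py; infer_instance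

-- ===== CLAIM (what is proved, stated in full; the proofs are below) =====
def Claim_equal_get_rc_delta_for_action_list_py : Prop := ∀ (action_list : List String), Dom_get_rc_delta_for_action_list_py action_list → Spec_get_rc_delta_for_action_list_py action_list (get_rc_delta_for_action_list_py action_list)

-- ===== LEMMAS AND PROOFS =====

-- ===== VERDICT (by name: the statement is the Claim_ definition above) =====
lemma pv_foldl_char (xs : List String) (c r : Int) :
    xs.foldl (fun (cr : Int × Int) action =>
      let cr := if action == "down" then (cr.1, cr.2 + 1) else cr
      let cr := if action == "up" then (cr.1, cr.2 - 1) else cr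
      let cr := if action == "left" then (cr.1 - 1, cr.2) else cr
      let cr := if action == "right" then (cr.1 + 1, cr.2) else cr
      cr) (c, r)
    = (c + (xs.count "right" : Int) - (xs.count "left" : Int),
       r + (xs.count "down" : Int) - (xs.count "up" : Int)) := by
  induction xs generalizing c r with
  | nil => simp
  | cons x xs ih =>
    simp only [List.foldl_cons, List.count_cons]
    by_cases h1 : x = "down" <;> by_cases h2 : x = "up" <;>
      by_cases h3 : x = "left" <;> by_cases h4 : x = "right" <;>
      simp only [h1, h2, h3, h4, if_pos, if_neg, beq_iff_eq, beq_self_eq_true,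
        if_true, reduceIte, ih, ne_eq, not_false_eq_true] <;>
      simp_all [ih] <;> push_cast <;> ring

theorem get_rc_delta_for_action_list_py_spec : Claim_equal_get_rc_delta_for_action_list_py := by
  intro xs _
  unfold Spec_get_rc_delta_for_action_list_py get_rc_delta_for_action_list_py get_rc_delta_for_action_list_py_alt
  rw [pv_foldl_char]
  simp [PySem.List.count_eq]
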